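-- pv_equiv track=rewrite | github.com/uyen-carolyn/CMPE188-Project | term-project-artifacts/visualization.py | num_of_cursewords
-- ===== SOURCE A (Python) =====
-- def num_of_cursewords(row):
--     '''
--     Computes the amount of curse words in a string
--     Takes a string as input
--     Returns an integer
--     '''
--     cursewords = { # predefined set of curse words
--         "ass",
--         "shit",
--         "fuck",
--         "bitch",
--         "cunt",
--         "nigga",
--         "nigger",
--         "damn",
--         "hell",
--         "kike",
--         "piss",
--         "dick",
--         "asshole",
--         "shithead",
--         "motherfucker",
--         "kike",
--         "pussy",
--         "cock",
--         "tit",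
--         "tits",
--         "bullshit",
--         "shitfaced",
--         "cocksucker",
--         "douchebag",
--         "dickhead",
--         "dumbass",
--         "fuckface",
--         "shithead",
--         "dipshit",
--         "asshat",
--         "fag",
--         "faggot"
--     }
--     count = 0
--     for w in row.split():
--         if w in cursewords:
--             count += 1
--     return count
-- ===== SOURCE B (Python) =====
-- CURSE_WORDS = (
--     "ass shit fuck bitch cunt nigga nigger damn hell kike piss dick "
--     "asshole shithead motherfucker pussy cock tit tits bullshit shitfaced "
--     "cocksucker douchebag dickhead dumbass fuckface dipshit asshat fag faggot"
-- ).split()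
--
-- def num_of_cursewords(row):
--     '''
--     Computes the amount of curse words in a string
--     Takes a string as input
--     Returns an integer
--     '''
--     # Invert the traversal: for each word of the fixed curse vocabulary,
--     # count its occurrences among the input words, and sum those counts.
--     words = row.split()
--     return sum(words.count(w) for w in CURSE_WORDS)
-- ===== Notes on version B (the rewrite author's own statement) =====
-- stated objective: alternative
-- what changed: B inverts the traversal: instead of scanning input words and testing membership in the curse set, it loops over the fixed curse vocabulary and sums each curse word's occurrence count in the split input.
import Mathlib
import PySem

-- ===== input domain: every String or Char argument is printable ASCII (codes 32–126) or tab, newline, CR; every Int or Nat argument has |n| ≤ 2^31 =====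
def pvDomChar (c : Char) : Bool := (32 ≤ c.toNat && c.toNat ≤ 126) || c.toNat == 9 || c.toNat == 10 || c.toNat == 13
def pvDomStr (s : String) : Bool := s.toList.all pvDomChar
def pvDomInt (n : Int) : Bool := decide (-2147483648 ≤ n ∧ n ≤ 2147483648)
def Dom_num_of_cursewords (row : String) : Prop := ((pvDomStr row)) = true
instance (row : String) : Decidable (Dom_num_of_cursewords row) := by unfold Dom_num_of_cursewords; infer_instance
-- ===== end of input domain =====

-- B inverts the traversal (alternative): it loops over the fixed curse vocabulary and sums each word's occurrence count in the split input, instead of scanning input words against a set.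

-- ===== PORT A =====
-- A's set literal, including its duplicate entries; Set.ofList dedups as Python's set literal does.
def pvCurseSet : PySem.Set String := PySem.Set.ofList
  ["ass", "shit", "fuck", "bitch", "cunt", "nigga", "nigger", "damn", "hell",
   "kike", "piss", "dick", "asshole", "shithead", "motherfucker", "kike",
   "pussy", "cock", "tit", "tits", "bullshit", "shitfaced", "cocksucker",
   "douchebag", "dickhead", "dumbass", "fuckface", "shithead", "dipshit",
   "asshat", "fag", "faggot"]

def num_of_cursewords (row : String) : Int :=
  (PySem.Str.split₀ row).foldl
    (fun count w => if PySem.Set.contains pvCurseSet w then count + 1 else count) 0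

-- ===== PORT B =====
-- Source B's module-level vocabulary: one space-separated string, split once.
def pvCurseVocab : List String :=
  PySem.Str.split₀
    ("ass shit fuck bitch cunt nigga nigger damn hell kike piss dick asshole shithead motherfucker pussy cock tit tits bullshit shitfaced cocksucker douchebag dickhead dumbass fuckface dipshit asshat fag faggot")

def num_of_cursewords_alt (row : String) : Int :=
  let words := PySem.Str.split₀ row
  (pvCurseVocab.map (fun w => ((PySem.List.count words w : Nat) : Int))).sum

-- ===== PRECONDITION & SPEC =====
def Spec_num_of_cursewords (row : String) (out : Int) : Prop := out = num_of_cursewords_alt row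
instance (row : String) (out : Int) : Decidable (Spec_num_of_cursewords row out) := by unfold Spec_num_of_cursewords; infer_instance

-- ===== CLAIM =====
def Claim_equal_num_of_cursewords : Prop := ∀ (row : String), Dom_num_of_cursewords row → Spec_num_of_cursewords row (num_of_cursewords row)

-- ===== LEMMAS AND PROOFS =====

set_option maxRecDepth 8192 in
lemma pvCurseSet_eq : pvCurseSet = pvCurseVocab := by decide

set_option maxRecDepth 8192 in
lemma pvCurseVocab_nodup : pvCurseVocab.Nodup := by decide

-- Σ_{w ∈ L} [x = w] = [x ∈ L] when L has no duplicates
lemma sum_indicator (L : List String) (hL : L.Nodup) (x : String) :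
    (L.map (fun w => if x = w then (1 : Int) else 0)).sum = if x ∈ L then 1 else 0 := by
  induction L with
  | nil => simp
  | cons a L ih =>
    simp only [List.map_cons, List.sum_cons, List.mem_cons, List.nodup_cons] at *
    rcases hL with ⟨ha, hL⟩
    rw [ih hL]
    by_cases hxa : x = a
    · subst hxa; simp [ha]
    · simp [hxa]

-- A's counting loop equals the vocabulary-indexed sum of occurrence counts.
lemma loop_eq (ws : List String) : ∀ (acc : Int),
    ws.foldl (fun c w => if PySem.Set.contains pvCurseSet w then c + 1 else c) acc
      = acc + (pvCurseVocab.map (fun w => ((ws.count w : Nat) : Int))).sum := by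
  induction ws with
  | nil => intro acc; simp
  | cons x ws ih =>
    intro acc
    simp only [List.foldl_cons, ih]
    have hcount : ∀ w, ((x :: ws).count w : Nat) = ws.count w + (if x = w then 1 else 0) := by
      intro w
      rw [List.count_cons]
      rcases eq_or_ne x w with h | h
      · simp [h]
      · simp [h, beq_iff_eq]
    have hsum : (pvCurseVocab.map (fun w => (((x :: ws).count w : Nat) : Int))).sum
        = (pvCurseVocab.map (fun w => ((ws.count w : Nat) : Int))).sum
          + (pvCurseVocab.map (fun w => if x = w then (1 : Int) else 0)).sum := by
      rw [← List.sum_map_add]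
      apply congrArg
      apply List.map_congr_left
      intro w _
      rw [hcount w]
      push_cast
      split_ifs <;> ring
    rw [hsum, sum_indicator pvCurseVocab pvCurseVocab_nodup x]
    have hmem : PySem.Set.contains pvCurseSet x = decide (x ∈ pvCurseVocab) := by
      rw [pvCurseSet_eq]
      simp [PySem.Set.contains]
    rw [hmem]
    by_cases hx : x ∈ pvCurseVocab
    · simp [hx]; ring
    · simp [hx]

-- ===== VERDICT =====
theorem num_of_cursewords_spec : Claim_equal_num_of_cursewords := by
  intro row _
  unfold Spec_num_of_cursewords num_of_cursewords num_of_cursewords_alt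
  simp only [PySem.List.count]
  rw [loop_eq (PySem.Str.split₀ row) 0, zero_add]
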